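-- pv_equiv track=rewrite | github.com/julsanabf/ntdscrackedit | ntdis-cracker.py | procesarResultados
-- ===== SOURCE A (Python) =====
-- def procesarResultados(hashesformatted, crackedhashesformatted):
--     resultados = {}
--
--     # Mapear hashes crackeados con los usuarios correspondientes
--     for k_cracked_hashes in crackedhashesformatted.keys():
--     	for v_hashes_formatted in hashesformatted.values():
--     	    if k_cracked_hashes == v_hashes_formatted:
--     	        users = getKey(v_hashes_formatted,hashesformatted)
--     	        for user in users:
--     	            resultados.update({user: crackedhashesformatted[k_cracked_hashes]})
--     return resultados
--
-- def getKey(val, mydict):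
--     mylist = []
--     for key, value in mydict.items():
--         if val == value:
--             mylist.append(key)
--     return mylist
-- ===== SOURCE B (Python) =====
-- def procesarResultados(hashesformatted, crackedhashesformatted):
--     # Build a reverse index hash -> [users] once, then map cracked hashes in one pass.
--     inv = {}
--     for user, h in hashesformatted.items():
--         inv[h] = inv.get(h, []) + [user]
--     resultados = {}
--     for h, cracked in crackedhashesformatted.items():
--         for user in inv.get(h, []):
--             resultados[user] = cracked
--     return resultados
-- ===== Notes on version B (the rewrite author's own statement) =====
-- stated objective: faster
-- what changed: B builds a reverse index hash->users over hashesformatted once and then does a single pass over crackedhashesformatted assigning each indexed user its cracked value, eliminating A's nested scan over all values and the getKey re-scan per match.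
import Mathlib
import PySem

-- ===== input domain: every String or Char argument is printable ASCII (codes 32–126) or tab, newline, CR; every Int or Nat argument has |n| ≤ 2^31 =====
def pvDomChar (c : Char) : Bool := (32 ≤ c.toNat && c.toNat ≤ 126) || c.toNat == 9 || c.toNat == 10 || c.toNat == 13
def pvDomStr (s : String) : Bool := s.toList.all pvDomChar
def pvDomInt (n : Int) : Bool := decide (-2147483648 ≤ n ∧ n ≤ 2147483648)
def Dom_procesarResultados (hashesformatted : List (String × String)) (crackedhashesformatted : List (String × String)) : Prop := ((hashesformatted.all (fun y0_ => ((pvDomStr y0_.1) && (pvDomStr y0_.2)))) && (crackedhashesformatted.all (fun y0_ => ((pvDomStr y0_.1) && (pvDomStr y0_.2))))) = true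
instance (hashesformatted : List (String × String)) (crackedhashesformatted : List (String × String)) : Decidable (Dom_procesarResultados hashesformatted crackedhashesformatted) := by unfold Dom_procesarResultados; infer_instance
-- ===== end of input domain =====

-- B replaces A's nested scan-and-rescan by a reverse index hash→users built once plus a single
-- pass over the cracked hashes (objective: faster).

-- ===== PORT A =====
def getKey (val : String) (mydict : List (String × String)) : List String :=
  mydict.foldl (fun mylist p => if val == p.2 then mylist ++ [p.1] else mylist) []

def procesarResultados (hashesformatted : List (String × String)) (crackedhashesformatted : List (String × String)) : List (String × String) :=
  let hd : PySem.Dict String String := PySem.Dict.mk hashesformatted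
  let cd : PySem.Dict String String := PySem.Dict.mk crackedhashesformatted
  let resultados : PySem.Dict String String :=
    cd.keys.foldl (fun resultados k =>
      hd.values.foldl (fun resultados v =>
        if k == v then
          -- crackedhashesformatted[k]: k comes from cd.keys, so the lookup always succeeds
          -- and the `.getD ""` default is unreachable
          (getKey v hashesformatted).foldl
            (fun resultados user => resultados.insert user ((cd.get? k).getD "")) resultados
        else resultados) resultados) PySem.Dict.empty
  resultados.items

-- ===== PORT B =====
def procesarResultados_alt (hashesformatted : List (String × String)) (crackedhashesformatted : List (String × String)) : List (String × String) :=
  let inv : PySem.Dict String (List String) :=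
    hashesformatted.foldl (fun inv p => inv.insert p.2 (inv.getD p.2 [] ++ [p.1])) PySem.Dict.empty
  let resultados : PySem.Dict String String :=
    crackedhashesformatted.foldl (fun resultados p =>
      (inv.getD p.1 []).foldl (fun resultados u => resultados.insert u p.2) resultados) PySem.Dict.empty
  resultados.items

-- ===== PRECONDITION & SPEC =====
-- The two association lists encode Python dicts, whose keys are unique; Pre_ states exactly that
-- (a list with duplicate keys corresponds to no dict input of the Python programs).
def Pre_procesarResultados (hashesformatted : List (String × String)) (crackedhashesformatted : List (String × String)) : Prop :=
  (hashesformatted.map Prod.fst).Nodup ∧ (crackedhashesformatted.map Prod.fst).Nodup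
instance (hashesformatted : List (String × String)) (crackedhashesformatted : List (String × String)) : Decidable (Pre_procesarResultados hashesformatted crackedhashesformatted) := by unfold Pre_procesarResultados; infer_instance

def pvWitness_procesarResultados : (List (String × String)) × (List (String × String)) :=
  ([("alice", "h1"), ("bob", "h2"), ("carol", "h1")], [("h1", "secret"), ("h3", "other")])

def Spec_procesarResultados (hashesformatted : List (String × String)) (crackedhashesformatted : List (String × String)) (out : List (String × String)) : Prop := out = procesarResultados_alt hashesformatted crackedhashesformatted
instance (hashesformatted : List (String × String)) (crackedhashesformatted : List (String × String)) (out : List (String × String)) : Decidable (Spec_procesarResultados hashesformatted crackedhashesformatted out) := by unfold Spec_procesarResultados; infer_instance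

-- ===== CLAIM (what is proved, stated in full; the proofs are below) =====
def Claim_equal_procesarResultados : Prop := ∀ (hashesformatted : List (String × String)) (crackedhashesformatted : List (String × String)), Dom_procesarResultados hashesformatted crackedhashesformatted → Pre_procesarResultados hashesformatted crackedhashesformatted → Spec_procesarResultados hashesformatted crackedhashesformatted (procesarResultados hashesformatted crackedhashesformatted)

-- ===== LEMMAS AND PROOFS =====

-- B's reverse index, named for the proofs (identical to the fold in procesarResultados_alt).
def pvInv (hf : List (String × String)) : PySem.Dict String (List String) :=
  hf.foldl (fun inv p => inv.insert p.2 (inv.getD p.2 [] ++ [p.1])) PySem.Dict.empty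

-- A's innermost insertion loop, named for the proofs.
def insAll (pw : String) (users : List String) (res : PySem.Dict String String) : PySem.Dict String String :=
  users.foldl (fun r u => r.insert u pw) res

theorem getKey_aux (k : String) (hf : List (String × String)) : ∀ acc : List String,
    hf.foldl (fun mylist p => if k == p.2 then mylist ++ [p.1] else mylist) acc
      = acc ++ (hf.filter (fun p => p.2 == k)).map Prod.fst := by
  induction hf with
  | nil => intro acc; simp
  | cons p t ih =>
    intro acc
    simp only [List.foldl_cons, List.filter_cons]
    by_cases h : k = p.2
    · rw [if_pos (by simpa using h), if_pos (by simpa using h.symm), ih]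
      simp
    · rw [if_neg (by simpa using h), if_neg (by simpa using Ne.symm h), ih]

theorem getKey_eq (k : String) (hf : List (String × String)) :
    getKey k hf = (hf.filter (fun p => p.2 == k)).map Prod.fst := by
  unfold getKey
  simpa only [List.nil_append] using getKey_aux k hf []

theorem inv_getD (hf : List (String × String)) (k : String) :
    (pvInv hf).getD k [] = getKey k hf := by
  have h : pvInv hf
      = (hf.map (fun p => (p.2, p.1))).foldl
          (fun d p => d.modify p.1 [] (fun x => x ++ [p.2])) PySem.Dict.empty := by
    rw [List.foldl_map]; rfl
  rw [h, PySem.Dict.getD_foldl_modify_append, getKey_eq]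
  simp [List.filter_map, List.map_map, Function.comp_def]

theorem get?_insAll (pw : String) : ∀ (users : List String) (res : PySem.Dict String String) (u : String),
    (insAll pw users res).get? u = if u ∈ users then some pw else res.get? u := by
  intro users
  induction users with
  | nil => intro res u; simp [insAll]
  | cons a t ih =>
    intro res u
    simp only [insAll, List.foldl_cons] at *
    rw [ih]
    by_cases h : u ∈ t
    · simp [h]
    · by_cases ha : u = a
      · simp [ha, PySem.Dict.get?_insert]
      · simp [ha, PySem.Dict.get?_insert]

theorem nodup_insAll (pw : String) (users : List String) (res : PySem.Dict String String)
    (h : res.keys.Nodup) : (insAll pw users res).keys.Nodup :=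
  PySem.Dict.nodup_keys_foldl_insert users (fun _ _ => pw) res h

theorem insert_self (d : PySem.Dict String String) (k v : String)
    (hnd : d.keys.Nodup) (h : d.get? k = some v) : d.insert k v = d := by
  apply PySem.Dict.ext
  have hc : d.contains k = true := by
    rw [PySem.Dict.contains_eq_isSome_get?, h]; rfl
  rw [PySem.Dict.items_insert_of_contains d v hc]
  have hmap : ∀ p ∈ d.items, (if (p.1 == k) = true then (k, v) else p) = p := by
    rintro ⟨p1, p2⟩ hp
    by_cases hk : p1 = k
    · subst hk
      have h2 : d.get? p1 = some p2 := PySem.Dict.get?_of_mem_items d hp hnd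
      rw [h] at h2
      simp [Option.some_inj.mp h2]
    · simp [hk]
  exact (List.map_congr_left hmap).trans (List.map_id _)

theorem insAll_noop (pw : String) (users : List String) (res : PySem.Dict String String)
    (hnd : res.keys.Nodup) (h : ∀ u ∈ users, res.get? u = some pw) : insAll pw users res = res := by
  induction users with
  | nil => rfl
  | cons a t ih =>
    simp only [insAll, List.foldl_cons] at *
    rw [insert_self res a pw hnd (h a List.mem_cons_self)]
    exact ih (fun u hu => h u (List.mem_cons_of_mem a hu))

theorem insAll_idem (pw : String) (users : List String) (res : PySem.Dict String String)
    (hnd : res.keys.Nodup) : insAll pw users (insAll pw users res) = insAll pw users res :=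
  insAll_noop pw users _ (nodup_insAll pw users res hnd)
    (fun u hu => by rw [get?_insAll]; simp [hu])

-- A's middle loop over the values list collapses to a single batch insertion.
theorem inner_loop (hf : List (String × String)) (k pw : String) :
    ∀ (vs : List String) (res : PySem.Dict String String), res.keys.Nodup →
    vs.foldl (fun res v => if k == v then
        (getKey v hf).foldl (fun res user => res.insert user pw) res else res) res
      = if k ∈ vs then insAll pw (getKey k hf) res else res := by
  intro vs
  induction vs with
  | nil => intro res _; simp
  | cons v t ih =>
    intro res hnd
    simp only [List.foldl_cons]
    by_cases h : k = v
    · subst h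
      rw [if_pos (by simp)]
      have hacc : List.foldl (fun (res : PySem.Dict String String) user => res.insert user pw)
          res (getKey k hf) = insAll pw (getKey k hf) res := rfl
      rw [hacc, ih _ (nodup_insAll pw (getKey k hf) res hnd),
        if_pos (List.mem_cons_self : k ∈ k :: t)]
      by_cases ht : k ∈ t
      · rw [if_pos ht]
        exact insAll_idem pw (getKey k hf) res hnd
      · rw [if_neg ht]
    · rw [if_neg (by simpa using h), ih _ hnd]
      by_cases ht : k ∈ t
      · rw [if_pos ht, if_pos (List.mem_cons_of_mem v ht)]
      · rw [if_neg ht, if_neg (by simp [List.mem_cons, h, ht])]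

theorem stepA (hf : List (String × String)) (k pw : String) (res : PySem.Dict String String)
    (hnd : res.keys.Nodup) :
    (hf.map (fun x => x.2)).foldl (fun res v => if k == v then
        (getKey v hf).foldl (fun res user => res.insert user pw) res else res) res
      = insAll pw (getKey k hf) res := by
  rw [inner_loop hf k pw _ res hnd]
  by_cases h : k ∈ hf.map (fun x => x.2)
  · rw [if_pos h]
  · have h' : ∀ p ∈ hf, ¬ p.2 = k := by
      intro p hp hpk
      exact h (List.mem_map.mpr ⟨p, hp, hpk⟩)
    have hg : getKey k hf = [] := by
      rw [getKey_eq]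
      have : hf.filter (fun p => p.2 == k) = [] := by
        rw [List.filter_eq_nil_iff]
        intro p hp
        simpa using h' p hp
      rw [this]
      rfl
    rw [if_neg h, hg]
    rfl

theorem main_fold (hf cf : List (String × String)) (hcf : (cf.map Prod.fst).Nodup) :
    ∀ (l : List (String × String)) (res : PySem.Dict String String), res.keys.Nodup →
    (∀ p ∈ l, p ∈ cf) →
    l.foldl (fun res p =>
        (hf.map (fun x => x.2)).foldl (fun res v => if p.1 == v then
            (getKey v hf).foldl
              (fun res user => res.insert user (((PySem.Dict.mk cf).get? p.1).getD "")) res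
          else res) res) res
      = l.foldl (fun res p => insAll p.2 (getKey p.1 hf) res) res := by
  intro l
  induction l with
  | nil => intro res _ _; rfl
  | cons p t ih =>
    intro res hnd hmem
    simp only [List.foldl_cons]
    have hget : (PySem.Dict.mk cf).get? p.1 = some p.2 :=
      PySem.Dict.get?_of_mem_items _ (hmem p List.mem_cons_self)
        (by simpa [PySem.Dict.keys_mk] using hcf)
    rw [stepA hf p.1 _ res hnd, hget]
    simp only [Option.getD_some]
    exact ih _ (nodup_insAll p.2 (getKey p.1 hf) res hnd)
      (fun q hq => hmem q (List.mem_cons_of_mem p hq))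

-- ===== VERDICT (by name: the statement is the Claim_ definition above) =====
theorem procesarResultados_spec : Claim_equal_procesarResultados := by
  intro hf cf _hdom hpre
  unfold Spec_procesarResultados
  have hA : procesarResultados hf cf
      = ((cf.map (fun x => x.1)).foldl (fun resultados k =>
          (hf.map (fun x => x.2)).foldl (fun resultados v => if k == v then
              (getKey v hf).foldl
                (fun resultados user =>
                  resultados.insert user (((PySem.Dict.mk cf).get? k).getD "")) resultados
            else resultados) resultados) PySem.Dict.empty).items := rfl
  have hB : procesarResultados_alt hf cf
      = (cf.foldl (fun resultados p =>
          ((pvInv hf).getD p.1 []).foldl (fun resultados u => resultados.insert u p.2)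
            resultados) PySem.Dict.empty).items := rfl
  have hstep : (fun (resultados : PySem.Dict String String) (p : String × String) =>
        ((pvInv hf).getD p.1 []).foldl (fun resultados u => resultados.insert u p.2) resultados)
      = fun res p => insAll p.2 (getKey p.1 hf) res := by
    funext res p
    rw [inv_getD]
    rfl
  rw [hA, hB]
  congr 1
  rw [List.foldl_map]
  refine Eq.trans (main_fold hf cf hpre.2 cf PySem.Dict.empty ?_ (fun _ h => h)) ?_
  · exact PySem.Dict.nodup_keys_empty
  · rw [hstep]
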